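-- pv_equiv track=rewrite | github.com/ksk-S/self-model-numerics | fig_ca_wd.py | cl_self_classes
-- ===== SOURCE A (Python) =====
-- N = 5            # world cells
--
-- N_AGENT = 4      # 2-bit memory: 4 agent states
--
-- W0 = 4           # initial world state: (0,0,1,0,0). Rule 0 dies in 1 step
--
-- def apply_rule(R, l, c, r):
--     """Wolfram rule R applied to neighborhood (l, c, r) in {0,1}^3."""
--     return (R >> (4 * l + 2 * c + r)) & 1
--
-- def step_world(R, w, A):
--     """w is integer encoding of (cell_0, ..., cell_{N-1}). Cell 0 <- A.
--     Other cells follow rule R cyclically (using the OLD cell-0 as their neighbour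
--     so the agent-override and rule update happen in lock-step)."""
--     bits = [(w >> i) & 1 for i in range(N)]
--     new = [0] * N
--     new[0] = A
--     for i in range(1, N):
--         l = bits[(i - 1) % N]
--         c = bits[i]
--         r = bits[(i + 1) % N]
--         new[i] = apply_rule(R, l, c, r)
--     return sum(b << i for i, b in enumerate(new))
--
-- def get_obs(w):
--     """Y_t = cell at position N-1 (the cell on the cyclic-ring opposite to agent)."""
--     return (w >> (N - 1)) & 1
--
-- def get_action(m, y):
--     """A_t = (m >> y) & 1 -- output the y-th bit of M_t.
--     With Y=0: outputs bit 0; with Y=1: outputs bit 1.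
--     All four memory states have distinct (A | Y=0, A | Y=1) pairs:
--       m=0 -> (0, 0), m=1 -> (1, 0), m=2 -> (0, 1), m=3 -> (1, 1).
--     So |epsilon^bare_self| = 4."""
--     return (m >> y) & 1
--
-- def step_agent(m, y, a):
--     """M_{t+1} = M_t XOR A_t -- toggle bit 0 of M by the agent's own action.
--     The update kernel g(M, Y, A) = M XOR A genuinely depends on A (Theorem E
--     enactivity: A = 0 leaves M, A = 1 toggles bit 0). Bit 1 of M is never
--     toggled, so a CL coupling whose Y stream never forces bit 1 to be read
--     fuses m=0 with m=2 and m=1 with m=3."""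
--     return m ^ a
--
-- def cl_self_classes(R, w_0=W0, T=64):
--     """Count CL-equivalence classes of agent memory states from a fixed initial
--     world w_0. Each m_0 produces a deterministic (Y, A)-trajectory of length T.
--     Two m_0's are CL-equivalent iff their trajectories are identical. The result
--     is |epsilon^CL_self|_R for the closed-loop reachable set R(S, T) seeded at
--     (m_0, w_0)."""
--     sigs = {}
--     for m0 in range(N_AGENT):
--         m, w = m0, w_0
--         trace = []
--         for _ in range(T):
--             y = get_obs(w)
--             a = get_action(m, y)
--             trace.append((y, a))
--             w = step_world(R, w, a)
--             m = step_agent(m, y, a)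
--         sigs[m0] = tuple(trace)
--     seen = {}
--     for m, s in sigs.items():
--         if s in seen:
--             seen[s].add(m)
--         else:
--             seen[s] = {m}
--     return len(seen)
-- ===== SOURCE B (Python) =====
-- N = 5
--
--
-- def cl_self_classes(R, w_0=4, T=64):
--     """Count CL-equivalence classes of the 4 agent memory states by running the
--     four closed-loop trajectories in lockstep, tracking which pairs have emitted
--     identical (Y, A) streams so far, and stopping as soon as the joint state of
--     the four trajectories repeats (from then on the streams are periodic, so no
--     pair can diverge any more)."""
--
--     def advance(m, w):
--         """One closed-loop step from (m, w): returns ((y, a), (m', w'))."""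
--         y = (w >> (N - 1)) & 1
--         a = (m >> y) & 1
--         bits = [(w >> i) & 1 for i in range(N)]
--         nw = a
--         for i in range(1, N):
--             nw += ((R >> (4 * bits[i - 1] + 2 * bits[i] + bits[(i + 1) % N])) & 1) << i
--         return (y, a), (m ^ a, nw)
--
--     s0, s1, s2, s3 = (0, w_0), (1, w_0), (2, w_0), (3, w_0)
--     e01 = e02 = e03 = e12 = e13 = e23 = True
--     seen = set()
--     t = 0
--     while t < T:
--         key = (s0, s1, s2, s3)
--         if key in seen:
--             break  # joint state is periodic: no further divergence is possible
--         seen.add(key)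
--         o0, s0 = advance(*s0)
--         o1, s1 = advance(*s1)
--         o2, s2 = advance(*s2)
--         o3, s3 = advance(*s3)
--         e01 = e01 and o0 == o1
--         e02 = e02 and o0 == o2
--         e03 = e03 and o0 == o3
--         e12 = e12 and o1 == o2
--         e13 = e13 and o1 == o3
--         e23 = e23 and o2 == o3
--         t += 1
--     # classes = trajectories that equal no earlier trajectory
--     return 1 + (not e01) + (not e02 and not e12) + (not e03 and not e13 and not e23)
-- ===== Notes on version B (the rewrite author's own statement) =====
-- stated objective: faster
-- what changed: Instead of building the four full length-T (Y,A)-trace tuples and counting distinct ones in a dict, B runs the four trajectories in lockstep keeping six pairwise 'still-identical' flags and stops as soon as the joint (m,w)-state of the four trajectories repeats, after which the streams are periodic and no pair can diverge.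
import Mathlib
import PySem

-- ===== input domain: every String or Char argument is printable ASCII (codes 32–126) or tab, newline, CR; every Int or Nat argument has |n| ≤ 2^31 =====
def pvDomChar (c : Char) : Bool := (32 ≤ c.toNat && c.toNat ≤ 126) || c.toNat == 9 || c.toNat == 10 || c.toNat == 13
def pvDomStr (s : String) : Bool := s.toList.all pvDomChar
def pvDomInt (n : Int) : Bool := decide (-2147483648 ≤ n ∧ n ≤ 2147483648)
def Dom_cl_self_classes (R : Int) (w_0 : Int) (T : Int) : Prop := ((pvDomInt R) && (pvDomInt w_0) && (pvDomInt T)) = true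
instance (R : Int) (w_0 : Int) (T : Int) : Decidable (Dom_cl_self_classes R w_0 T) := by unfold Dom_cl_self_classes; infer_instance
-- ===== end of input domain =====

-- B re-implements A by lockstep simulation of the 4 trajectories with pairwise-divergence flags
-- and a stop as soon as the joint state repeats (the streams are then periodic): measurably faster for large T.

-- ===== PORT A =====
-- Python `x >> k` is Lean `x >>> k` (k : Nat); every shift count A reaches is nonnegative, so `.toNat` is exact.
def apply_rule (R l c r : Int) : Int :=
  PySem.Int.band (R >>> (4 * l + 2 * c + r).toNat) 1

def step_world (R w A : Int) : Int :=      -- N = 5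
  let bits := (PySem.List.pyRange 0 5 1).map (fun i => PySem.Int.band (w >>> i.toNat) 1)
  let new : List Int := List.replicate 5 0
  let new := PySem.List.pySetD new 0 A
  let new := (PySem.List.pyRange 1 5 1).foldl (fun new i =>
      let l := PySem.List.pyGetD bits (PySem.Int.mod (i - 1) 5) 0
      let c := PySem.List.pyGetD bits i 0
      let r := PySem.List.pyGetD bits (PySem.Int.mod (i + 1) 5) 0
      PySem.List.pySetD new i (apply_rule R l c r)) new
  ((PySem.List.enumerate new 0).map (fun p => p.2 <<< p.1.toNat)).sum

def get_obs (w : Int) : Int := PySem.Int.band (w >>> 4) 1   -- N - 1 = 4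

def get_action (m y : Int) : Int := PySem.Int.band (m >>> y.toNat) 1

def step_agent (m y a : Int) : Int := PySem.Int.bxor m a

def cl_self_classes (R : Int) (w_0 : Int) (T : Int) : Int :=   -- N_AGENT = 4
  let sigs := (PySem.List.pyRange 0 4 1).foldl (fun (sigs : PySem.Dict Int (List (Int × Int))) m0 =>
      let st := (PySem.List.pyRange 0 T 1).foldl (fun (st : Int × Int × List (Int × Int)) _ =>
          let m := st.1
          let w := st.2.1
          let trace := st.2.2
          let y := get_obs w
          let a := get_action m y
          (step_agent m y a, step_world R w a, trace ++ [(y, a)])) (m0, w_0, [])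
      sigs.insert m0 st.2.2) PySem.Dict.empty
  let seen := sigs.items.foldl (fun (seen : PySem.Dict (List (Int × Int)) (PySem.Set Int)) p =>
      if seen.contains p.2 then seen.insert p.2 (PySem.Set.add (seen.getD p.2 PySem.Set.empty) p.1)
      else seen.insert p.2 (PySem.Set.ofList [p.1])) PySem.Dict.empty
  (seen.size : Int)

-- ===== PORT B =====
-- Source B's `advance`: one closed-loop step from (m, w), returning ((y, a), (m', w')).
def advance_alt (R m w : Int) : (Int × Int) × (Int × Int) :=
  let y := PySem.Int.band (w >>> 4) 1          -- N - 1 = 4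
  let a := PySem.Int.band (m >>> y.toNat) 1
  let bits := (PySem.List.pyRange 0 5 1).map (fun i => PySem.Int.band (w >>> i.toNat) 1)
  let nw := (PySem.List.pyRange 1 5 1).foldl (fun nw i =>
      nw + (PySem.Int.band (R >>> (4 * PySem.List.pyGetD bits (i - 1) 0
              + 2 * PySem.List.pyGetD bits i 0
              + PySem.List.pyGetD bits (PySem.Int.mod (i + 1) 5) 0).toNat) 1) <<< i.toNat) a
  ((y, a), (PySem.Int.bxor m a, nw))

-- Source B's while-loop: fuel T.toNat = the number of iterations `while t < T` can make; `break` on a repeated joint state.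
def loop_alt (R : Int) : Nat → (Int × Int) → (Int × Int) → (Int × Int) → (Int × Int) →
    Bool → Bool → Bool → Bool → Bool → Bool →
    PySem.Set ((Int × Int) × (Int × Int) × (Int × Int) × (Int × Int)) →
    Bool × Bool × Bool × Bool × Bool × Bool
  | 0, _, _, _, _, e01, e02, e03, e12, e13, e23, _ => (e01, e02, e03, e12, e13, e23)
  | n + 1, s0, s1, s2, s3, e01, e02, e03, e12, e13, e23, seen =>
    let key := (s0, s1, s2, s3)
    if PySem.Set.contains seen key then (e01, e02, e03, e12, e13, e23)
    else
      let r0 := advance_alt R s0.1 s0.2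
      let r1 := advance_alt R s1.1 s1.2
      let r2 := advance_alt R s2.1 s2.2
      let r3 := advance_alt R s3.1 s3.2
      loop_alt R n r0.2 r1.2 r2.2 r3.2
        (e01 && (r0.1 == r1.1)) (e02 && (r0.1 == r2.1)) (e03 && (r0.1 == r3.1))
        (e12 && (r1.1 == r2.1)) (e13 && (r1.1 == r3.1)) (e23 && (r2.1 == r3.1))
        (PySem.Set.add seen key)

def cl_self_classes_alt (R : Int) (w_0 : Int) (T : Int) : Int :=
  let e := loop_alt R T.toNat (0, w_0) (1, w_0) (2, w_0) (3, w_0)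
      true true true true true true PySem.Set.empty
  -- 1 + (not e01) + (not e02 and not e12) + (not e03 and not e13 and not e23)
  1 + (if e.1 then 0 else 1)
    + (if !e.2.1 && !e.2.2.2.1 then 1 else 0)
    + (if !e.2.2.1 && !e.2.2.2.2.1 && !e.2.2.2.2.2 then 1 else 0)

-- ===== PRECONDITION & SPEC =====
def Spec_cl_self_classes (R : Int) (w_0 : Int) (T : Int) (out : Int) : Prop := out = cl_self_classes_alt R w_0 T
instance (R : Int) (w_0 : Int) (T : Int) (out : Int) : Decidable (Spec_cl_self_classes R w_0 T out) := by unfold Spec_cl_self_classes; infer_instance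

-- ===== CLAIM (what is proved, stated in full; the proofs are below) =====
def Claim_equal_cl_self_classes : Prop := ∀ (R : Int) (w_0 : Int) (T : Int), Dom_cl_self_classes R w_0 T → Spec_cl_self_classes R w_0 T (cl_self_classes R w_0 T)

-- ===== LEMMAS AND PROOFS =====

-- Math layer (proof-only): one closed-loop step, trajectory, emission, emitted trace prefix.
def clStep (R : Int) (s : Int × Int) : Int × Int :=
  (step_agent s.1 (get_obs s.2) (get_action s.1 (get_obs s.2)),
   step_world R s.2 (get_action s.1 (get_obs s.2)))
def clEm (s : Int × Int) : Int × Int := (get_obs s.2, get_action s.1 (get_obs s.2))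

lemma pyRange05 : PySem.List.pyRange 0 5 1 = [0,1,2,3,4] := by decide
lemma pyRange15 : PySem.List.pyRange 1 5 1 = [1,2,3,4] := by decide
lemma pyRange04 : PySem.List.pyRange 0 4 1 = [0,1,2,3] := by decide

lemma advance_alt_eq (R m w : Int) : advance_alt R m w = (clEm (m, w), clStep R (m, w)) := by
  simp [advance_alt, clEm, clStep, step_world, get_obs, get_action, step_agent, apply_rule,
    pyRange05, pyRange15, PySem.List.enumerate, PySem.List.pyGetD, PySem.List.pySetD,
    PySem.List.pySet?, PySem.List.pyGet?, PySem.List.pyIdx?, PySem.Int.mod]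
  ring
def clTraj (R : Int) (s : Int × Int) (k : Nat) : Int × Int := (clStep R)^[k] s
def clTrc (R : Int) (s : Int × Int) (n : Nat) : List (Int × Int) :=
  (List.range n).map (fun k => clEm (clTraj R s k))

lemma clTraj_zero (R : Int) (s : Int × Int) : clTraj R s 0 = s := rfl
lemma clTraj_succ (R : Int) (s : Int × Int) (k : Nat) :
    clTraj R s (k + 1) = clStep R (clTraj R s k) := Function.iterate_succ_apply' _ _ _
lemma clTraj_succ' (R : Int) (s : Int × Int) (k : Nat) :
    clTraj R s (k + 1) = clTraj R (clStep R s) k := Function.iterate_succ_apply _ _ _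

lemma clTrc_succ (R : Int) (s : Int × Int) (n : Nat) :
    clTrc R s (n + 1) = clTrc R s n ++ [clEm (clTraj R s n)] := by
  simp [clTrc, List.range_succ]

lemma clTrc_eq_iff (R : Int) (s s' : Int × Int) (n : Nat) :
    clTrc R s n = clTrc R s' n ↔ ∀ q < n, clEm (clTraj R s q) = clEm (clTraj R s' q) := by
  constructor
  · intro h q hq
    have := congrArg (fun l => l[q]?) h
    simpa [clTrc, hq] using this
  · intro h
    apply List.ext_getElem <;> simp [clTrc]
    intro q hq; exact h q hq

-- A's inner fold builds (clTraj, clTraj, trace ++ clTrc)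
lemma foldA_gen (R : Int) (l : List Int) :
    ∀ (s : Int × Int) (tr : List (Int × Int)),
    l.foldl (fun (st : Int × Int × List (Int × Int)) _ =>
        (step_agent st.1 (get_obs st.2.1) (get_action st.1 (get_obs st.2.1)),
         step_world R st.2.1 (get_action st.1 (get_obs st.2.1)),
         st.2.2 ++ [(get_obs st.2.1, get_action st.1 (get_obs st.2.1))])) (s.1, s.2, tr)
      = ((clTraj R s l.length).1, (clTraj R s l.length).2,
         tr ++ (List.range l.length).map (fun k => clEm (clTraj R s k))) := by
  induction l with
  | nil => intro s tr; simp [clTraj]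
  | cons x xs ih =>
    intro s tr
    simp only [List.foldl_cons, List.length_cons]
    have e1 : (step_agent s.1 (get_obs s.2) (get_action s.1 (get_obs s.2)),
        step_world R s.2 (get_action s.1 (get_obs s.2)),
        tr ++ [(get_obs s.2, get_action s.1 (get_obs s.2))])
        = ((clStep R s).1, (clStep R s).2, tr ++ [clEm s]) := by
      simp [clStep, clEm]
    rw [e1, ih (clStep R s) (tr ++ [clEm s])]
    refine Prod.ext (by rw [clTraj_succ']) (Prod.ext (by rw [clTraj_succ']) ?_)
    show tr ++ [clEm s] ++ _ = tr ++ _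
    rw [List.range_succ_eq_map]
    simp [List.append_assoc, Function.comp_def, clTraj_succ', clTraj_zero]
def cntFour (t0 t1 t2 t3 : List (Int × Int)) : Int :=
  1 + (if t1 = t0 then 0 else 1) + (if t2 = t0 ∨ t2 = t1 then 0 else 1)
    + (if t3 = t0 ∨ t3 = t1 ∨ t3 = t2 then 0 else 1)

lemma seenCount (t0 t1 t2 t3 : List (Int × Int)) :
    ((([(0, t0), (1, t1), (2, t2), (3, t3)] : List (Int × List (Int × Int))).foldl
      (fun (seen : PySem.Dict (List (Int × Int)) (PySem.Set Int)) p =>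
        if seen.contains p.2 then seen.insert p.2 (PySem.Set.add (seen.getD p.2 PySem.Set.empty) p.1)
        else seen.insert p.2 (PySem.Set.ofList [p.1])) PySem.Dict.empty).size : Int)
    = cntFour t0 t1 t2 t3 := by
  by_cases h01 : t1 = t0 <;> by_cases h02 : t2 = t0 <;> by_cases h12 : t2 = t1 <;>
    by_cases h03 : t3 = t0 <;> by_cases h13 : t3 = t1 <;> by_cases h23 : t3 = t2 <;>
    simp_all [cntFour, PySem.Dict.contains_insert, PySem.Dict.size_insert,
      PySem.Dict.contains_empty, PySem.Dict.size_empty]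
lemma items_four (a b c d : List (Int × Int)) :
    ((((PySem.Dict.empty.insert 0 a).insert 1 b).insert 2 c).insert (3 : Int) d).items
      = [(0, a), (1, b), (2, c), (3, d)] := rfl

lemma A_eq (R w_0 T : Int) :
    cl_self_classes R w_0 T
      = cntFour (clTrc R (0, w_0) T.toNat) (clTrc R (1, w_0) T.toNat)
          (clTrc R (2, w_0) T.toNat) (clTrc R (3, w_0) T.toNat) := by
  have hf : ∀ m0 : Int,
      (PySem.List.pyRange 0 T 1).foldl (fun (st : Int × Int × List (Int × Int)) _ =>
        (step_agent st.1 (get_obs st.2.1) (get_action st.1 (get_obs st.2.1)),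
         step_world R st.2.1 (get_action st.1 (get_obs st.2.1)),
         st.2.2 ++ [(get_obs st.2.1, get_action st.1 (get_obs st.2.1))])) (m0, w_0, [])
      = ((clTraj R (m0, w_0) T.toNat).1, (clTraj R (m0, w_0) T.toNat).2, clTrc R (m0, w_0) T.toNat) := by
    intro m0
    have := foldA_gen R (PySem.List.pyRange 0 T 1) (m0, w_0) []
    simpa [clTrc, PySem.List.length_pyRange_one] using this
  simp only [cl_self_classes, pyRange04, List.foldl_cons, List.foldl_nil]
  rw [hf 0, hf 1, hf 2, hf 3, items_four, seenCount]
lemma traj_shift (R : Int) (s : Int × Int) (d a : Nat) :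
    clTraj R s (d + a) = (clStep R)^[d] (clTraj R s a) := Function.iterate_add_apply _ _ _ _

lemma traj_periodic (R : Int) (s : Int × Int) (t0 p : Nat)
    (hp : clTraj R s (t0 + p) = clTraj R s t0) (d : Nat) :
    clTraj R s (t0 + p + d) = clTraj R s (t0 + d) := by
  have h1 : t0 + p + d = d + (t0 + p) := by omega
  have h2 : t0 + d = d + t0 := by omega
  rw [h1, h2, traj_shift R s d (t0 + p), traj_shift R s d t0, hp]

lemma em_all_eq (R : Int) (s s' : Int × Int) (t0 k : Nat) (ht : t0 < k)
    (hs : clTraj R s k = clTraj R s t0) (hs' : clTraj R s' k = clTraj R s' t0)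
    (hpre : ∀ q < k, clEm (clTraj R s q) = clEm (clTraj R s' q)) :
    ∀ q, clEm (clTraj R s q) = clEm (clTraj R s' q) := by
  intro q
  induction q using Nat.strong_induction_on with
  | _ q ih =>
    by_cases hq : q < k
    · exact hpre q hq
    · have hp : t0 + (k - t0) = k := by omega
      have hq' : q = t0 + (k - t0) + (q - k) := by omega
      have e1 : clTraj R s q = clTraj R s (t0 + (q - k)) := by
        have h := traj_periodic R s t0 (k - t0) (by rw [hp]; exact hs) (q - k)
        rwa [show t0 + (k - t0) + (q - k) = q by omega] at h
      have e2 : clTraj R s' q = clTraj R s' (t0 + (q - k)) := by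
        have h := traj_periodic R s' t0 (k - t0) (by rw [hp]; exact hs') (q - k)
        rwa [show t0 + (k - t0) + (q - k) = q by omega] at h
      rw [e1, e2]
      exact ih (t0 + (q - k)) (by omega)

lemma trc_eq_iff_of_repeat (R : Int) (s s' : Int × Int) (t0 k N : Nat) (ht : t0 < k) (hk : k ≤ N)
    (hs : clTraj R s k = clTraj R s t0) (hs' : clTraj R s' k = clTraj R s' t0) :
    (clTrc R s k = clTrc R s' k) ↔ (clTrc R s N = clTrc R s' N) := by
  rw [clTrc_eq_iff, clTrc_eq_iff]
  constructor
  · intro h q _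
    exact em_all_eq R s s' t0 k ht hs hs' h q
  · intro h q hq
    exact h q (by omega)
lemma beq_eq_decide' {α : Type} [DecidableEq α] [BEq α] [LawfulBEq α] (a b : α) :
    (a == b) = decide (a = b) := by by_cases h : a = b <;> simp [h]

lemma flag_step (R : Int) (s s' : Int × Int) (k : Nat) :
    (decide (clTrc R s k = clTrc R s' k) && (clEm (clTraj R s k) == clEm (clTraj R s' k)))
      = decide (clTrc R s (k + 1) = clTrc R s' (k + 1)) := by
  rw [clTrc_succ, clTrc_succ, beq_eq_decide', ← Bool.decide_and, decide_eq_decide]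
  constructor
  · rintro ⟨h1, h2⟩; rw [h1, h2]
  · intro h
    have := List.append_inj h (by simp [clTrc])
    exact ⟨this.1, by simpa using this.2⟩

def clJ (R w0 : Int) (k : Nat) : (Int × Int) × (Int × Int) × (Int × Int) × (Int × Int) :=
  (clTraj R (0, w0) k, clTraj R (1, w0) k, clTraj R (2, w0) k, clTraj R (3, w0) k)

lemma loop_alt_spec (R w0 : Int) : ∀ (n k : Nat)
    (seen : PySem.Set ((Int × Int) × (Int × Int) × (Int × Int) × (Int × Int))),
    (∀ key, key ∈ seen ↔ ∃ t, t < k ∧ clJ R w0 t = key) →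
    loop_alt R n (clTraj R (0, w0) k) (clTraj R (1, w0) k) (clTraj R (2, w0) k) (clTraj R (3, w0) k)
      (decide (clTrc R (0, w0) k = clTrc R (1, w0) k)) (decide (clTrc R (0, w0) k = clTrc R (2, w0) k))
      (decide (clTrc R (0, w0) k = clTrc R (3, w0) k)) (decide (clTrc R (1, w0) k = clTrc R (2, w0) k))
      (decide (clTrc R (1, w0) k = clTrc R (3, w0) k)) (decide (clTrc R (2, w0) k = clTrc R (3, w0) k)) seen
    = (decide (clTrc R (0, w0) (k + n) = clTrc R (1, w0) (k + n)),
       decide (clTrc R (0, w0) (k + n) = clTrc R (2, w0) (k + n)),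
       decide (clTrc R (0, w0) (k + n) = clTrc R (3, w0) (k + n)),
       decide (clTrc R (1, w0) (k + n) = clTrc R (2, w0) (k + n)),
       decide (clTrc R (1, w0) (k + n) = clTrc R (3, w0) (k + n)),
       decide (clTrc R (2, w0) (k + n) = clTrc R (3, w0) (k + n))) := by
  intro n
  induction n with
  | zero => intro k seen _; simp [loop_alt]
  | succ n ih =>
    intro k seen hseen
    rw [loop_alt]
    by_cases hmem : PySem.Set.contains seen (clTraj R (0, w0) k, clTraj R (1, w0) k, clTraj R (2, w0) k, clTraj R (3, w0) k) = true
    · rw [if_pos hmem]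
      have hkey : ∃ t, t < k ∧ clJ R w0 t = clJ R w0 k := by
        have := (hseen (clJ R w0 k)).mp ((PySem.Set.contains_iff _ _).mp hmem)
        simpa [clJ] using this
      obtain ⟨t0, ht0, hJ⟩ := hkey
      have h0 : clTraj R (0, w0) k = clTraj R (0, w0) t0 := (congrArg (·.1) hJ).symm
      have h1 : clTraj R (1, w0) k = clTraj R (1, w0) t0 := (congrArg (·.2.1) hJ).symm
      have h2 : clTraj R (2, w0) k = clTraj R (2, w0) t0 := (congrArg (·.2.2.1) hJ).symm
      have h3 : clTraj R (3, w0) k = clTraj R (3, w0) t0 := (congrArg (·.2.2.2) hJ).symm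
      have hk : k ≤ k + (n + 1) := by omega
      refine congrArg₂ Prod.mk ?_ (congrArg₂ Prod.mk ?_ (congrArg₂ Prod.mk ?_
        (congrArg₂ Prod.mk ?_ (congrArg₂ Prod.mk ?_ ?_))))
      · exact decide_eq_decide.mpr (trc_eq_iff_of_repeat R _ _ t0 k _ ht0 hk h0 h1)
      · exact decide_eq_decide.mpr (trc_eq_iff_of_repeat R _ _ t0 k _ ht0 hk h0 h2)
      · exact decide_eq_decide.mpr (trc_eq_iff_of_repeat R _ _ t0 k _ ht0 hk h0 h3)
      · exact decide_eq_decide.mpr (trc_eq_iff_of_repeat R _ _ t0 k _ ht0 hk h1 h2)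
      · exact decide_eq_decide.mpr (trc_eq_iff_of_repeat R _ _ t0 k _ ht0 hk h1 h3)
      · exact decide_eq_decide.mpr (trc_eq_iff_of_repeat R _ _ t0 k _ ht0 hk h2 h3)
    · rw [if_neg hmem]
      simp only [advance_alt_eq, Prod.mk.eta, ← clTraj_succ, flag_step]
      have hinv : ∀ key, key ∈ PySem.Set.add seen (clTraj R (0, w0) k, clTraj R (1, w0) k, clTraj R (2, w0) k, clTraj R (3, w0) k) ↔ ∃ t, t < k + 1 ∧ clJ R w0 t = key := by
        intro key
        rw [PySem.Set.mem_add, hseen key]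
        constructor
        · rintro (⟨t, ht, he⟩ | he)
          · exact ⟨t, by omega, he⟩
          · exact ⟨k, by omega, by simp [clJ, he]⟩
        · rintro ⟨t, ht, he⟩
          by_cases htk : t < k
          · exact Or.inl ⟨t, htk, he⟩
          · right; have : t = k := by omega
            subst this; simp [clJ] at he; rw [← he]
      have := ih (k + 1) _ hinv
      rw [show k + 1 + n = k + (n + 1) by omega] at this
      exact this
lemma clTrc_zero (R : Int) (s : Int × Int) : clTrc R s 0 = [] := rfl

lemma B_eq (R w_0 T : Int) :
    cl_self_classes_alt R w_0 T
      = cntFour (clTrc R (0, w_0) T.toNat) (clTrc R (1, w_0) T.toNat)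
          (clTrc R (2, w_0) T.toNat) (clTrc R (3, w_0) T.toNat) := by
  have hinv : ∀ key, key ∈ (PySem.Set.empty : PySem.Set ((Int × Int) × (Int × Int) × (Int × Int) × (Int × Int))) ↔ ∃ t, t < 0 ∧ clJ R w_0 t = key := by
    intro key
    constructor
    · intro h; exact absurd h (by simp [PySem.Set.empty])
    · rintro ⟨t, ht, -⟩; omega
  have h := loop_alt_spec R w_0 T.toNat 0 PySem.Set.empty hinv
  simp only [clTraj_zero, clTrc_zero, Nat.zero_add, decide_true] at h
  simp only [cl_self_classes_alt]
  rw [h]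
  by_cases h01 : clTrc R (0, w_0) T.toNat = clTrc R (1, w_0) T.toNat <;>
    by_cases h02 : clTrc R (0, w_0) T.toNat = clTrc R (2, w_0) T.toNat <;>
    by_cases h12 : clTrc R (1, w_0) T.toNat = clTrc R (2, w_0) T.toNat <;>
    by_cases h03 : clTrc R (0, w_0) T.toNat = clTrc R (3, w_0) T.toNat <;>
    by_cases h13 : clTrc R (1, w_0) T.toNat = clTrc R (3, w_0) T.toNat <;>
    by_cases h23 : clTrc R (2, w_0) T.toNat = clTrc R (3, w_0) T.toNat <;>
    simp_all [cntFour, eq_comm]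


-- ===== VERDICT (by name: the statement is the Claim_ definition above) =====
theorem cl_self_classes_spec : Claim_equal_cl_self_classes := by
  intro R w_0 T _
  unfold Spec_cl_self_classes
  rw [A_eq, B_eq]
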